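-- pv_equiv track=rewrite | github.com/Shab00/codingProblems | fantaDrink.py | solve
-- ===== SOURCE A (Python) =====
-- from typing import List
--
-- def solve(prices:List[int], coins:List[int])->List[int]:
--
--     pl, lp = 0, len(prices) - 1
--     pc, lc = 0, len(coins) - 1
--     count = 0
--     output = []
--
--     while pl <= lp and pc <= lc:
--
--         if pl == lp:
--             if coins[pc] >= prices[pl]:
--                 count += 1
--             output.append(count)
--             count = 0
--             pl = 0
--             pc += 1
--
--         elif coins[pc] >= prices[pl]:
--             count += 1
--             pl += 1
--
--         else:
--             pl += 1
--
--     return output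
-- ===== SOURCE B (Python) =====
-- from typing import List
--
-- def solve(prices: List[int], coins: List[int]) -> List[int]:
--     sp = sorted(prices)
--     out = []
--     for c in coins:
--         lo, hi = 0, len(sp)
--         while lo < hi:
--             mid = (lo + hi) // 2
--             if c < sp[mid]:
--                 hi = mid
--             else:
--                 lo = mid + 1
--         out.append(lo)
--     return out
-- ===== Notes on version B (the rewrite author's own statement) =====
-- stated objective: faster
-- what changed: Replaces A's flattened nested scan (rescanning all prices for every coin) by sorting the prices once and answering each coin with a hand-written binary search (upper bound) on the sorted list.
-- intended difference: When prices is empty and coins is non-empty, A returns [] (its while loop never runs), while B returns a 0 for every coin, the intended count of affordable prices per coin. — e.g. on solve([], [5]): A returns [], B returns [0]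
import Mathlib
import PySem

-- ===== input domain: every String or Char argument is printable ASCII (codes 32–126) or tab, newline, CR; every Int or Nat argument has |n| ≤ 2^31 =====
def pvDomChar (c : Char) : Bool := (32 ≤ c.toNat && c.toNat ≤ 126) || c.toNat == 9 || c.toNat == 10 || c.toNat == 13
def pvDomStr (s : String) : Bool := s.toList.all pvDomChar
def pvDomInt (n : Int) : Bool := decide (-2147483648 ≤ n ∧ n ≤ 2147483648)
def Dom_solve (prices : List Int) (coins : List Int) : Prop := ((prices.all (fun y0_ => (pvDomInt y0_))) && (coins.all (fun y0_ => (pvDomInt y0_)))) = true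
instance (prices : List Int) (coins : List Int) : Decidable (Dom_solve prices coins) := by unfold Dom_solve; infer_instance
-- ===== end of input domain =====

-- B sorts the prices once and answers each coin by a hand-written binary search (upper bound)
-- instead of A's flattened rescanning of all prices per coin; return-value equivalence only.

-- ===== PORT A =====
-- A's single while loop, with its pointer/accumulator state carried verbatim.
-- The fuel argument is only a structural-termination guard; solve passes enough
-- fuel for every iteration the Python loop performs (proved in the lemmas below).
def solveALoop (prices : List Int) (coins : List Int) (lp lc : Int) :
    Nat → Nat → Nat → Int → List Int → List Int
  | 0, _, _, _, output => output
  | fuel + 1, pl, pc, count, output =>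
    if (pl : Int) ≤ lp ∧ (pc : Int) ≤ lc then
      if (pl : Int) = lp then
        let count' := if coins.getD pc 0 ≥ prices.getD pl 0 then count + 1 else count
        solveALoop prices coins lp lc fuel 0 (pc + 1) 0 (output ++ [count'])
      else if coins.getD pc 0 ≥ prices.getD pl 0 then
        solveALoop prices coins lp lc fuel (pl + 1) pc (count + 1) output
      else
        solveALoop prices coins lp lc fuel (pl + 1) pc count output
    else output

def solve (prices : List Int) (coins : List Int) : List Int :=
  solveALoop prices coins ((prices.length : Int) - 1) ((coins.length : Int) - 1)
    ((prices.length + 1) * (coins.length + 1) + 1) 0 0 0 []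

-- ===== PORT B =====
-- Source B's hand-written upper-bound binary search (cannot import bisect: A imports only typing).
-- The fuel argument is only a structural-termination guard; hi - lo halves each
-- step, so the initial fuel hi - lo always suffices.
def bsearchF (sp : List Int) (c : Int) : Nat → Nat → Nat → Nat
  | 0, lo, _ => lo
  | fuel + 1, lo, hi =>
    if lo < hi then
      let mid := (lo + hi) / 2
      if c < sp.getD mid 0 then bsearchF sp c fuel lo mid else bsearchF sp c fuel (mid + 1) hi
    else lo

def bsearch (sp : List Int) (c : Int) (lo hi : Nat) : Nat :=
  bsearchF sp c (hi - lo) lo hi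

def solve_alt (prices : List Int) (coins : List Int) : List Int :=
  let sp := PySem.List.sorted prices (fun x => x) false
  coins.map (fun c => ((bsearch sp c 0 sp.length : Nat) : Int))

-- ===== PRECONDITION & SPEC =====
-- When prices is empty and coins is non-empty, A returns [] (its while loop never runs),
-- while B returns a 0 for every coin, the intended count of affordable prices per coin.
def D_solve (prices : List Int) (coins : List Int) : Prop := prices = [] ∧ coins ≠ []
instance (prices : List Int) (coins : List Int) : Decidable (D_solve prices coins) := by
  unfold D_solve; infer_instance

def Spec_solve (prices : List Int) (coins : List Int) (out : List Int) : Prop :=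
  ¬ D_solve prices coins → out = solve_alt prices coins
instance (prices : List Int) (coins : List Int) (out : List Int) : Decidable (Spec_solve prices coins out) := by
  unfold Spec_solve; infer_instance

def pvDiffWitness_solve : List Int × List Int := ([], [5])
def pvDiffWitnessOut_solve : (List Int) × (List Int) := ([], [0])

-- ===== CLAIM (what is proved, stated in full; the proofs are below) =====
def Claim_unchanged_solve : Prop := ∀ (prices : List Int) (coins : List Int), Dom_solve prices coins → Spec_solve prices coins (solve prices coins)
def Claim_changed_solve : Prop := Dom_solve (pvDiffWitness_solve.1) (pvDiffWitness_solve.2) ∧ D_solve (pvDiffWitness_solve.1) (pvDiffWitness_solve.2) ∧ solve (pvDiffWitness_solve.1) (pvDiffWitness_solve.2) = pvDiffWitnessOut_solve.1 ∧ solve_alt (pvDiffWitness_solve.1) (pvDiffWitness_solve.2) = pvDiffWitnessOut_solve.2 ∧ pvDiffWitnessOut_solve.1 ≠ pvDiffWitnessOut_solve.2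
def Claim_exact_solve : Prop := ∀ (prices : List Int) (coins : List Int), Dom_solve prices coins → D_solve prices coins → solve prices coins ≠ solve_alt prices coins

-- ===== LEMMAS AND PROOFS =====

-- countP of a list whose predicate holds exactly on the first k positions is k.
theorem countP_eq_of_index (l : List Int) (p : Int → Bool) (k : Nat) (hk : k ≤ l.length)
    (h : ∀ i (hi : i < l.length), p l[i] = decide (i < k)) : l.countP p = k := by
  induction l generalizing k with
  | nil => simp at hk; simpa using hk.symm
  | cons a t ih =>
    have ha := h 0 (by simp)
    cases k with
    | zero =>
      have ht : t.countP p = 0 := by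
        refine List.countP_eq_zero.mpr ?_
        intro x hx
        obtain ⟨i, hi, hx⟩ := List.mem_iff_getElem.mp hx
        have := h (i + 1) (by simpa using Nat.succ_lt_succ hi)
        simp at this
        rw [← hx]
        simpa using this
      simp at ha
      simp [ha, ht]
    | succ k' =>
      simp at ha
      have ih' := ih k' (by simpa using hk) (fun i hi => by
        have := h (i + 1) (by simpa using Nat.succ_lt_succ hi)
        simpa [Nat.succ_lt_succ_iff] using this)
      simp [ha, ih']

-- the binary search on a sorted list computes the count of elements ≤ c
theorem bsearchF_countP (sp : List Int) (c : Int)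
    (hsort : sp.Pairwise (· ≤ ·)) :
    ∀ fuel lo hi, hi - lo ≤ fuel → lo ≤ hi → hi ≤ sp.length →
    (∀ i, i < lo → sp.getD i 0 ≤ c) →
    (∀ i, hi ≤ i → i < sp.length → c < sp.getD i 0) →
    bsearchF sp c fuel lo hi = sp.countP (fun p => decide (p ≤ c)) := by
  have hmono : ∀ i j, ∀ (hij : i ≤ j) (hj : j < sp.length), sp[i]'(by omega) ≤ sp[j] := by
    intro i j hij hj
    rcases Nat.lt_or_ge i j with h | h
    · exact (List.pairwise_iff_getElem.mp hsort) i j (by omega) hj h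
    · have : i = j := by omega
      subst this; exact le_refl _
  intro fuel
  induction fuel with
  | zero =>
    intro lo hi hfuel hlo hhi hlow hhigh
    have hle : lo = hi := by omega
    refine (countP_eq_of_index sp _ lo (by omega) ?_).symm
    intro i hi'
    by_cases hik : i < lo
    · have := hlow i hik
      rw [List.getD_eq_getElem sp 0 hi'] at this
      simp [this, hik]
    · have := hhigh i (by omega) hi'
      rw [List.getD_eq_getElem sp 0 hi'] at this
      simp [hik]
      omega
  | succ fuel ih =>
    intro lo hi hfuel hlo hhi hlow hhigh
    show (if lo < hi then _ else lo) = _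
    by_cases hlt : lo < hi
    · rw [if_pos hlt]
      show (if c < sp.getD ((lo + hi) / 2) 0 then bsearchF sp c fuel lo ((lo + hi) / 2)
            else bsearchF sp c fuel ((lo + hi) / 2 + 1) hi) = _
      by_cases hc : c < sp.getD ((lo + hi) / 2) 0
      · rw [if_pos hc]
        refine ih lo ((lo + hi) / 2) (by omega) (by omega) (by omega) hlow ?_
        intro i hmi hilen
        have hmidlen : (lo + hi) / 2 < sp.length := by omega
        have h1 : sp[(lo + hi) / 2]'hmidlen ≤ sp[i]'hilen := hmono _ i hmi hilen
        rw [List.getD_eq_getElem sp 0 hmidlen] at hc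
        rw [List.getD_eq_getElem sp 0 hilen]
        omega
      · rw [if_neg hc]
        refine ih ((lo + hi) / 2 + 1) hi (by omega) (by omega) hhi ?_ hhigh
        intro i hil
        have hmidlen : (lo + hi) / 2 < sp.length := by omega
        have hilen : i < sp.length := by omega
        have h1 : sp[i]'hilen ≤ sp[(lo + hi) / 2]'hmidlen := hmono i _ (by omega) hmidlen
        rw [List.getD_eq_getElem sp 0 hmidlen] at hc
        rw [List.getD_eq_getElem sp 0 hilen]
        omega
    · rw [if_neg hlt]
      have hle : lo = hi := by omega
      refine (countP_eq_of_index sp _ lo (by omega) ?_).symm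
      intro i hi'
      by_cases hik : i < lo
      · have := hlow i hik
        rw [List.getD_eq_getElem sp 0 hi'] at this
        simp [this, hik]
      · have := hhigh i (by omega) hi'
        rw [List.getD_eq_getElem sp 0 hi'] at this
        simp [hik]
        omega

-- scanning prices for one coin: the loop appends one count and moves to the next coin,
-- consuming exactly prices.length - pl iterations of fuel
theorem scan_one (prices coins : List Int) (pc : Nat) (hpc : pc < coins.length) :
    ∀ k fuel pl count output, prices.length - pl = k → pl < prices.length →
    solveALoop prices coins ((prices.length : Int) - 1) ((coins.length : Int) - 1)
        (fuel + k) pl pc count output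
      = solveALoop prices coins ((prices.length : Int) - 1) ((coins.length : Int) - 1)
          fuel 0 (pc + 1) 0
          (output ++ [count + (((prices.drop pl).countP (fun p => decide (p ≤ coins.getD pc 0)) : Nat) : Int)]) := by
  intro k
  induction k with
  | zero => intro fuel pl count output hk hpl; omega
  | succ k ih =>
    intro fuel pl count output hk hpl
    have hcond : ((pl : Int) ≤ (prices.length : Int) - 1 ∧ (pc : Int) ≤ (coins.length : Int) - 1) := by
      constructor <;> [omega; omega]
    show (if _ ∧ _ then _ else _) = _
    rw [if_pos hcond]
    simp only [Nat.add_eq]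
    by_cases hlast : pl = prices.length - 1
    · have hplInt : (pl : Int) = (prices.length : Int) - 1 := by omega
      rw [if_pos hplInt]
      have hk0 : k = 0 := by omega
      subst hk0
      congr 1
      have hdrop : prices.drop pl = [prices[pl]'hpl] := by
        rw [List.drop_eq_getElem_cons hpl]
        have : pl + 1 = prices.length := by omega
        rw [this, List.drop_length]
      rw [hdrop]
      rw [List.getD_eq_getElem prices 0 hpl]
      simp only [List.countP_cons, List.countP_nil]
      split_ifs with h1 <;> simp_all [ge_iff_le] <;> omega
    · have hpl1 : pl + 1 < prices.length := by omega
      have hplInt : ¬ ((pl : Int) = (prices.length : Int) - 1) := by omega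
      rw [if_neg hplInt]
      have hdrop : prices.drop pl = prices[pl]'hpl :: prices.drop (pl + 1) := List.drop_eq_getElem_cons hpl
      rw [List.getD_eq_getElem prices 0 hpl]
      split_ifs with h1
      · rw [ih fuel (pl + 1) (count + 1) output (by omega) hpl1]
        congr 2
        rw [hdrop, List.countP_cons]
        have hp : (decide (prices[pl]'hpl ≤ coins.getD pc 0)) = true := decide_eq_true h1
        rw [hp, if_pos rfl]
        push_cast
        ring
      · rw [ih fuel (pl + 1) count output (by omega) hpl1]
        congr 2
        rw [hdrop, List.countP_cons]
        have hp : (decide (prices[pl]'hpl ≤ coins.getD pc 0)) = false :=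
          decide_eq_false (fun h => h1 h)
        rw [hp, if_neg (by simp)]
        push_cast
        ring

-- iterating over the remaining coins
theorem coins_scan (prices coins : List Int) (hne : prices ≠ []) :
    ∀ j pc output fuel, coins.length - pc = j →
    solveALoop prices coins ((prices.length : Int) - 1) ((coins.length : Int) - 1)
        (fuel + (j * prices.length + 1)) 0 pc 0 output
      = output ++ (coins.drop pc).map (fun c => ((prices.countP (fun p => decide (p ≤ c)) : Nat) : Int)) := by
  have hn : 0 < prices.length := List.length_pos_iff.mpr hne
  intro j
  induction j with
  | zero =>
    intro pc output fuel hj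
    have hstop : ¬ ((((0:Nat)) : Int) ≤ (prices.length : Int) - 1 ∧ ((pc : Nat) : Int) ≤ (coins.length : Int) - 1) := by
      push_cast
      omega
    show (if (((0:Nat) : Int) ≤ (prices.length : Int) - 1 ∧ ((pc : Nat) : Int) ≤ (coins.length : Int) - 1) then _ else _) = _
    rw [if_neg hstop, List.drop_eq_nil_of_le (by omega), List.map_nil, List.append_nil]
  | succ j ih =>
    intro pc output fuel hj
    have hpc : pc < coins.length := by omega
    have harith : fuel + ((j + 1) * prices.length + 1)
        = (fuel + (j * prices.length + 1)) + (prices.length - 0) := by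
      rw [Nat.sub_zero]
      ring
    rw [harith, scan_one prices coins pc hpc (prices.length - 0) _ 0 0 output rfl hn]
    rw [ih (pc + 1) _ fuel (by omega)]
    rw [List.drop_eq_getElem_cons hpc, List.map_cons]
    rw [List.getD_eq_getElem coins 0 hpc]
    simp

theorem solve_characterize (prices coins : List Int) (hne : prices ≠ []) :
    solve prices coins = coins.map (fun c => ((prices.countP (fun p => decide (p ≤ c)) : Nat) : Int)) := by
  have hn : 0 < prices.length := List.length_pos_iff.mpr hne
  rw [solve]
  have harith : (prices.length + 1) * (coins.length + 1) + 1
      = (prices.length + coins.length + 1) + (coins.length * prices.length + 1) := by ring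
  rw [harith, coins_scan prices coins hne coins.length 0 [] _ (by omega)]
  simp

theorem solve_alt_characterize (prices coins : List Int) :
    solve_alt prices coins = coins.map (fun c => ((prices.countP (fun p => decide (p ≤ c)) : Nat) : Int)) := by
  simp only [solve_alt]
  refine List.map_congr_left ?_
  intro c _
  congr 1
  have hsort : (PySem.List.sorted prices (fun x => x) false).Pairwise (· ≤ ·) := by
    simpa using PySem.List.sorted_pairwise prices (fun x => x)
  rw [bsearch, bsearchF_countP _ c hsort _ 0 _ (by omega) (Nat.zero_le _) (le_refl _)
        (fun i h => absurd h (Nat.not_lt_zero i)) (fun i h1 h2 => absurd h2 (by omega))]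
  exact (PySem.List.sorted_perm prices (fun x => x) false).countP_eq _

-- ===== VERDICT (by name: the statement is the Claim_ definition above) =====
theorem solve_spec : Claim_unchanged_solve := by
  intro prices coins _ hD
  by_cases hne : prices = []
  · subst hne
    have hc : coins = [] := by
      by_contra hc
      exact hD ⟨rfl, hc⟩
    subst hc
    rfl
  · rw [solve_characterize prices coins hne, solve_alt_characterize]

theorem solve_changed : Claim_changed_solve := by unfold Claim_changed_solve; decide

theorem solve_tight : Claim_exact_solve := by
  intro prices coins _ hD h
  obtain ⟨hp, hc⟩ := hD
  subst hp
  rw [solve_alt_characterize] at h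
  have hsolve : solve [] coins = [] := by
    rw [solve]
    show (if (((0:Nat) : Int) ≤ ((([]:List Int)).length : Int) - 1 ∧ ((0:Nat) : Int) ≤ (coins.length : Int) - 1) then _ else _) = ([] : List Int)
    rw [if_neg (by simp)]
  rw [hsolve] at h
  exact hc (by simpa using (List.map_eq_nil_iff.mp h.symm))
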